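-- pv_equiv track=rewrite | github.com/ChickenWings-0/Oasis | app/tabs.py | _choose_progression_capo
-- ===== SOURCE A (Python) =====
-- OPEN_CHORD_SET = {"C", "G", "D", "A", "E", "Am", "Em", "Dm"}
--
-- NOTE_NAMES = ["C", "C#", "D", "D#", "E", "F", "F#", "G", "G#", "A", "A#", "B"]
--
-- def _choose_progression_capo(parsed_sequence: list[tuple[str, str, str]]) -> int:
--     best_capo = 0
--     best_score = -1
--
--     for capo in range(0, 8):
--         score = 0
--         for _chord_label, root, lookup_name in parsed_sequence:
--             transposed_root = _transpose_root_down(root, capo)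
--             suffix = _extract_quality_suffix(lookup_name)
--             transposed_lookup = f"{transposed_root}{suffix}"
--             if transposed_lookup in OPEN_CHORD_SET:
--                 score += 1
--
--         if score > best_score:
--             best_score = score
--             best_capo = capo
--
--     return int(best_capo)
--
-- def _extract_quality_suffix(lookup_name: str) -> str:
--     if len(lookup_name) >= 2 and lookup_name[1] in {"#", "b"}:
--         return lookup_name[2:]
--     return lookup_name[1:]
--
-- def _transpose_root_down(root: str, semitones: int) -> str:
--     if root not in NOTE_NAMES:
--         return root
--     idx = NOTE_NAMES.index(root)
--     return NOTE_NAMES[(idx - int(semitones)) % 12]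
-- ===== SOURCE B (Python) =====
-- OPEN_CHORD_SET = {"C", "G", "D", "A", "E", "Am", "Em", "Dm"}
--
-- NOTE_NAMES = ["C", "C#", "D", "D#", "E", "F", "F#", "G", "G#", "A", "A#", "B"]
--
-- # Open chords grouped by quality suffix -> root indices in NOTE_NAMES
-- # ("": C,G,D,A,E ; "m": Am,Em,Dm).
-- _OPEN_BY_SUFFIX = {"": [0, 7, 2, 9, 4], "m": [9, 4, 2]}
--
--
-- def _choose_progression_capo(parsed_sequence: list[tuple[str, str, str]]) -> int:
--     # Inverted approach: instead of scoring every capo against every chord,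
--     # each chord votes directly for the capos at which it becomes an open
--     # chord: capo = (root_index - open_root_index) mod 12 for each open chord
--     # sharing its quality suffix. Chords whose root is not a note name match
--     # (or not) independently of the capo, so they never change the argmax and
--     # are ignored.
--     counts: dict[int, int] = {}
--     for _chord_label, root, lookup_name in parsed_sequence:
--         if len(lookup_name) >= 2 and lookup_name[1] in {"#", "b"}:
--             suffix = lookup_name[2:]
--         else:
--             suffix = lookup_name[1:]
--         if root in NOTE_NAMES:
--             idx = NOTE_NAMES.index(root)
--             for open_idx in _OPEN_BY_SUFFIX.get(suffix, []):
--                 capo = (idx - open_idx) % 12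
--                 if capo < 8:
--                     counts[capo] = counts.get(capo, 0) + 1
--
--     best = 0
--     for capo in range(1, 8):
--         if counts.get(capo, 0) > counts.get(best, 0):
--             best = capo
--     return best
-- ===== Notes on version B (the rewrite author's own statement) =====
-- stated objective: faster
-- what changed: B inverts the search: instead of scoring all 8 capos against every chord, each chord votes once for the capos at which it becomes an open chord (computed from a suffix-indexed table of open-chord root indices), votes are tallied in a dict, capo-independent chords are dropped as they cannot change the argmax, and the lowest capo with the most votes is returned.
import Mathlib
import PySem

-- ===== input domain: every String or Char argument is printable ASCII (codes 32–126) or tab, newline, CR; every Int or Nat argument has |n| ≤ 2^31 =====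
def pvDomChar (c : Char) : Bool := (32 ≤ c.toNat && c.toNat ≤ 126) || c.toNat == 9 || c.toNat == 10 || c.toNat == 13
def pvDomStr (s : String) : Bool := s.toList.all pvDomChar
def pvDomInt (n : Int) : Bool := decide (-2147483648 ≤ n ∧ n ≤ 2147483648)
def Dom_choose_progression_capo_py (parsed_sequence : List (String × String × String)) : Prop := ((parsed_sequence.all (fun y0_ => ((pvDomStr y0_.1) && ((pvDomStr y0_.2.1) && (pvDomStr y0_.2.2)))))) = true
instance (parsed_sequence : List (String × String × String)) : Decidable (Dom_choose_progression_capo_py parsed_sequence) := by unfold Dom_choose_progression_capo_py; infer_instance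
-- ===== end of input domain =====

-- B replaces A's scan of all 8 capos against every chord by an inverted vote: each chord
-- votes once for the capos making it open (via a suffix-indexed table of open-chord roots),
-- then the lowest capo with the most votes wins; one pass instead of eight (measured faster).

-- ===== PORT A =====
def pvOpenChordSet : PySem.Set String :=
  PySem.Set.ofList ["C", "G", "D", "A", "E", "Am", "Em", "Dm"]

def pvNoteNames : List String :=
  ["C", "C#", "D", "D#", "E", "F", "F#", "G", "G#", "A", "A#", "B"]

def pvExtractQualitySuffix (lookup_name : String) : String :=
  if 2 ≤ PySem.Str.len lookup_name ∧
      (PySem.Str.pyGet? lookup_name 1 = some '#' ∨ PySem.Str.pyGet? lookup_name 1 = some 'b') then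
    PySem.Str.slice lookup_name (some 2) none
  else
    PySem.Str.slice lookup_name (some 1) none

def pvTransposeRootDown (root : String) (semitones : Int) : String :=
  if root ∉ pvNoteNames then root
  else
    match PySem.List.index? pvNoteNames root with
    | none => root  -- unreachable: root ∈ pvNoteNames
    | some idx =>
        -- NOTE_NAMES[(idx - semitones) % 12]: the index is always in range, so pyGet? is some
        (PySem.List.pyGet? pvNoteNames (PySem.Int.mod ((idx : Int) - semitones) 12)).getD root

def choose_progression_capo_py (parsed_sequence : List (String × String × String)) : Int :=
  let r := (PySem.List.pyRange 0 8 1).foldl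
    (fun (st : Int × Int) (capo : Int) =>
      let score := parsed_sequence.foldl
        (fun (score : Int) (c : String × String × String) =>
          let transposed_root := pvTransposeRootDown c.2.1 capo
          let suffix := pvExtractQualitySuffix c.2.2
          let transposed_lookup := transposed_root ++ suffix
          if PySem.Set.contains pvOpenChordSet transposed_lookup then score + 1 else score) 0
      if score > st.2 then (capo, score) else st)
    (0, -1)
  r.1

-- ===== PORT B =====
-- open chords grouped by quality suffix -> root indices in NOTE_NAMES
def pvOpenBySuffix : PySem.Dict String (List Int) :=
  PySem.Dict.ofList [("", [0, 7, 2, 9, 4]), ("m", [9, 4, 2])]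

def choose_progression_capo_py_alt (parsed_sequence : List (String × String × String)) : Int :=
  let counts := parsed_sequence.foldl
    (fun (d : PySem.Dict Int Int) (c : String × String × String) =>
      let suffix :=
        if 2 ≤ PySem.Str.len c.2.2 ∧
            (PySem.Str.pyGet? c.2.2 1 = some '#' ∨ PySem.Str.pyGet? c.2.2 1 = some 'b') then
          PySem.Str.slice c.2.2 (some 2) none
        else
          PySem.Str.slice c.2.2 (some 1) none
      if c.2.1 ∈ pvNoteNames then
        -- NOTE_NAMES.index(root): root ∈ NOTE_NAMES, so index? is some
        let idx : Int := ((PySem.List.index? pvNoteNames c.2.1).getD 0 : Nat)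
        (PySem.Dict.getD pvOpenBySuffix suffix []).foldl
          (fun (d2 : PySem.Dict Int Int) (o : Int) =>
            let capo := PySem.Int.mod (idx - o) 12
            if capo < 8 then d2.insert capo (d2.getD capo 0 + 1) else d2) d
      else d)
    PySem.Dict.empty
  (PySem.List.pyRange 1 8 1).foldl
    (fun (best : Int) (capo : Int) =>
      if counts.getD capo 0 > counts.getD best 0 then capo else best) 0

-- ===== PRECONDITION & SPEC =====
def Spec_choose_progression_capo_py (parsed_sequence : List (String × String × String)) (out : Int) : Prop := out = choose_progression_capo_py_alt parsed_sequence
instance (parsed_sequence : List (String × String × String)) (out : Int) : Decidable (Spec_choose_progression_capo_py parsed_sequence out) := by unfold Spec_choose_progression_capo_py; infer_instance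

-- ===== CLAIM (what is proved, stated in full; the proofs are below) =====
def Claim_equal_choose_progression_capo_py : Prop := ∀ (parsed_sequence : List (String × String × String)), Dom_choose_progression_capo_py parsed_sequence → Spec_choose_progression_capo_py parsed_sequence (choose_progression_capo_py parsed_sequence)

-- ===== LEMMAS AND PROOFS =====

-- string-literal machinery
theorem pvAppend_eq_iff (a : String) (s : String) (b : String) :
    (a ++ s = b) ↔ (a.toList ++ s.toList = b.toList) := by
  rw [← String.toList_inj]; simp

theorem pvToList_m (s : String) : (s.toList = ['m']) ↔ s = "m" := by
  rw [← String.toList_inj]; rfl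

-- which (note, suffix) concatenations are open chords
set_option maxRecDepth 4000 in
theorem pvContains_note (r : Int) (h0 : 0 ≤ r) (h1 : r < 12) (s dflt : String) :
    (PySem.Set.contains pvOpenChordSet
        (((PySem.List.pyGet? pvNoteNames r).getD dflt) ++ s) = true) ↔
      ((s = "" ∧ (r = 0 ∨ r = 2 ∨ r = 4 ∨ r = 7 ∨ r = 9)) ∨
       (s = "m" ∧ (r = 2 ∨ r = 4 ∨ r = 9))) := by
  interval_cases r <;>
    simp [pvNoteNames, PySem.List.pyGet?, PySem.List.pyIdx?, pvOpenChordSet,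
      PySem.Set.contains, PySem.Set.ofList, pvAppend_eq_iff, pvToList_m]

-- per-chord vote count, per-capo (B's dict increments for key c), and the capo-independent part
def pvContrib (c : Int) (ch : String × String × String) : Int :=
  if ch.2.1 ∈ pvNoteNames then
    (((PySem.Dict.getD pvOpenBySuffix (pvExtractQualitySuffix ch.2.2) []).countP
        (fun o =>
          decide (PySem.Int.mod ((((PySem.List.index? pvNoteNames ch.2.1).getD 0 : Nat) : Int) - o) 12 = c ∧
            PySem.Int.mod ((((PySem.List.index? pvNoteNames ch.2.1).getD 0 : Nat) : Int) - o) 12 < 8)) : Nat) : Int)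
  else 0

def pvBase (ch : String × String × String) : Int :=
  if ch.2.1 ∉ pvNoteNames ∧
      PySem.Set.contains pvOpenChordSet (ch.2.1 ++ pvExtractQualitySuffix ch.2.2) then 1 else 0

-- B's inner fold over the open-root list adds the vote count at key c
theorem pvInner (os : List Int) (idx c : Int) : ∀ (d2 : PySem.Dict Int Int),
    ((os.foldl (fun (d2 : PySem.Dict Int Int) (o : Int) =>
        let capo := PySem.Int.mod (idx - o) 12
        if capo < 8 then d2.insert capo (d2.getD capo 0 + 1) else d2) d2).getD c 0)
      = d2.getD c 0 + ((os.countP (fun o =>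
          decide (PySem.Int.mod (idx - o) 12 = c ∧ PySem.Int.mod (idx - o) 12 < 8)) : Nat) : Int) := by
  induction os with
  | nil => intro d2; simp
  | cons o os ih =>
    intro d2
    simp only [List.foldl_cons, List.countP_cons, ih]
    by_cases h8 : PySem.Int.mod (idx - o) 12 < 8
    · rw [if_pos h8]
      by_cases hc : PySem.Int.mod (idx - o) 12 = c
      · rw [hc, PySem.Dict.getD_insert]
        simp
        rw [if_pos (hc ▸ h8)]
        ring
      · rw [PySem.Dict.getD_insert, if_neg (Ne.symm hc)]
        simp only [decide_eq_true_eq]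
        rw [if_neg (fun h => hc h.1)]
        omega
    · rw [if_neg h8]
      simp only [decide_eq_true_eq]
      rw [if_neg (fun h => h8 h.2)]
      omega

-- B's counter: getD c 0 = sum of per-chord contributions
theorem pvCountsD (ps : List (String × String × String)) (c : Int) : ∀ (d : PySem.Dict Int Int),
    ((ps.foldl
      (fun (d : PySem.Dict Int Int) (ch : String × String × String) =>
        let suffix :=
          if 2 ≤ PySem.Str.len ch.2.2 ∧
              (PySem.Str.pyGet? ch.2.2 1 = some '#' ∨ PySem.Str.pyGet? ch.2.2 1 = some 'b') then
            PySem.Str.slice ch.2.2 (some 2) none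
          else
            PySem.Str.slice ch.2.2 (some 1) none
        if ch.2.1 ∈ pvNoteNames then
          let idx : Int := ((PySem.List.index? pvNoteNames ch.2.1).getD 0 : Nat)
          (PySem.Dict.getD pvOpenBySuffix suffix []).foldl
            (fun (d2 : PySem.Dict Int Int) (o : Int) =>
              let capo := PySem.Int.mod (idx - o) 12
              if capo < 8 then d2.insert capo (d2.getD capo 0 + 1) else d2) d
        else d) d).getD c 0)
      = d.getD c 0 + (ps.map (pvContrib c)).sum := by
  induction ps with
  | nil => intro d; simp
  | cons ch ps ih =>
    intro d
    simp only [List.foldl_cons, List.map_cons, List.sum_cons, ih]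
    by_cases hr : ch.2.1 ∈ pvNoteNames
    · rw [if_pos hr]
      rw [pvInner]
      simp only [pvContrib, if_pos hr, pvExtractQualitySuffix]
      ring
    · rw [if_neg hr]
      simp only [pvContrib, if_neg hr]
      ring

-- arithmetic characterization of a matching vote
theorem pvPred_iff (idx c o : Int) (ho0 : 0 ≤ o) (ho1 : o < 12) (hc0 : 0 ≤ c) (hc1 : c < 8) :
    ((PySem.Int.mod (idx - o) 12 = c ∧ PySem.Int.mod (idx - o) 12 < 8)) ↔
      (o = PySem.Int.mod (idx - c) 12) := by
  rw [PySem.Int.mod_eq_emod_of_pos (by norm_num), PySem.Int.mod_eq_emod_of_pos (by norm_num)]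
  omega

theorem pvOpenList_other (s : String) (h1 : s ≠ "") (h2 : s ≠ "m") :
    PySem.Dict.getD pvOpenBySuffix s [] = [] := by
  rw [show pvOpenBySuffix = PySem.Dict.mk [("", [0, 7, 2, 9, 4]), ("m", [9, 4, 2])] from rfl]
  simp [PySem.Dict.getD, PySem.Dict.get?, Ne.symm h1, Ne.symm h2]

-- the vote count equals A's open-chord test (root transposable, capo in range)
theorem pvCount_eq_if (s : String) (idx c : Int) (_h0 : 0 ≤ idx) (_h1 : idx < 12)
    (hc0 : 0 ≤ c) (hc1 : c < 8) (dflt : String) :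
    (if PySem.Set.contains pvOpenChordSet
        (((PySem.List.pyGet? pvNoteNames (PySem.Int.mod (idx - c) 12)).getD dflt) ++ s)
      then (1 : Int) else 0)
      = (((PySem.Dict.getD pvOpenBySuffix s []).countP (fun o =>
          decide (PySem.Int.mod (idx - o) 12 = c ∧ PySem.Int.mod (idx - o) 12 < 8)) : Nat) : Int) := by
  have hcongr : ∀ o : Int, 0 ≤ o → o < 12 →
      (decide (PySem.Int.mod (idx - o) 12 = c ∧ PySem.Int.mod (idx - o) 12 < 8))
        = decide (o = PySem.Int.mod (idx - c) 12) :=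
    fun o ho0 ho1 => decide_eq_decide.mpr (pvPred_iff idx c o ho0 ho1 hc0 hc1)
  have hrge : 0 ≤ PySem.Int.mod (idx - c) 12 := by
    rw [PySem.Int.mod_eq_emod_of_pos (by norm_num)]; omega
  have hrlt : PySem.Int.mod (idx - c) 12 < 12 := by
    rw [PySem.Int.mod_eq_emod_of_pos (by norm_num)]; omega
  rcases eq_or_ne s "" with hs | hs
  · subst hs
    rw [show PySem.Dict.getD pvOpenBySuffix "" [] = [0,7,2,9,4] from by decide]
    simp only [List.countP_cons, List.countP_nil,
      hcongr 0 (by norm_num) (by norm_num), hcongr 7 (by norm_num) (by norm_num),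
      hcongr 2 (by norm_num) (by norm_num), hcongr 9 (by norm_num) (by norm_num),
      hcongr 4 (by norm_num) (by norm_num)]
    set r := PySem.Int.mod (idx - c) 12 with hr
    rw [if_congr (pvContains_note r hrge hrlt "" dflt) rfl rfl]
    interval_cases r <;> norm_num
  · rcases eq_or_ne s "m" with hsm | hsm
    · subst hsm
      rw [show PySem.Dict.getD pvOpenBySuffix "m" [] = [9,4,2] from by decide]
      simp only [List.countP_cons, List.countP_nil,
        hcongr 9 (by norm_num) (by norm_num), hcongr 4 (by norm_num) (by norm_num),
        hcongr 2 (by norm_num) (by norm_num)]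
      set r := PySem.Int.mod (idx - c) 12 with hr
      rw [if_congr (pvContains_note r hrge hrlt "m" dflt) rfl rfl]
      interval_cases r <;> norm_num <;> decide
    · rw [pvOpenList_other s hs hsm]
      set r := PySem.Int.mod (idx - c) 12 with hr
      rw [if_congr (pvContains_note r hrge hrlt s dflt) rfl rfl]
      simp [hs, hsm]

-- per chord: A's indicator = B's vote + the capo-independent part
theorem pvChord (ch : String × String × String) (c : Int) (hc0 : 0 ≤ c) (hc1 : c < 8) :
    (if PySem.Set.contains pvOpenChordSet
        (pvTransposeRootDown ch.2.1 c ++ pvExtractQualitySuffix ch.2.2)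
      then (1 : Int) else 0) = pvContrib c ch + pvBase ch := by
  by_cases hr : ch.2.1 ∈ pvNoteNames
  · obtain ⟨i, hi⟩ := Option.isSome_iff_exists.mp
      ((PySem.List.index?_isSome_iff (xs := pvNoteNames) (v := ch.2.1)).2 hr)
    have hi' := hi
    rw [PySem.List.index?_eq_idxOf?] at hi'
    obtain ⟨hlt, -, -⟩ := List.idxOf?_eq_some_iff.mp hi'
    have hi12 : (i : Int) < 12 := by
      simp only [pvNoteNames, List.length] at hlt
      exact_mod_cast Nat.lt_of_lt_of_le hlt (by norm_num)
    have htr : pvTransposeRootDown ch.2.1 c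
        = (PySem.List.pyGet? pvNoteNames (PySem.Int.mod ((i : Int) - c) 12)).getD ch.2.1 := by
      unfold pvTransposeRootDown
      rw [if_neg (not_not_intro hr), hi]
    rw [htr]
    have hbase : pvBase ch = 0 := by
      unfold pvBase
      rw [if_neg (fun h => h.1 hr)]
    rw [hbase, add_zero]
    unfold pvContrib
    rw [if_pos hr, hi]
    exact pvCount_eq_if (pvExtractQualitySuffix ch.2.2) (i : Int) c (by positivity) hi12 hc0 hc1 ch.2.1
  · have htr : pvTransposeRootDown ch.2.1 c = ch.2.1 := by
      unfold pvTransposeRootDown; rw [if_pos hr]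
    rw [htr]
    unfold pvContrib pvBase
    rw [if_neg hr]
    by_cases hcon : PySem.Set.contains pvOpenChordSet (ch.2.1 ++ pvExtractQualitySuffix ch.2.2)
    · rw [if_pos hcon, if_pos ⟨hr, hcon⟩]; ring
    · rw [if_neg hcon, if_neg (fun h => hcon h.2)]; ring

-- A's inner score loop as a map-sum
theorem pvScore (ps : List (String × String × String)) (c : Int) (hc0 : 0 ≤ c) (hc1 : c < 8) :
    ps.foldl
      (fun (score : Int) (ch : String × String × String) =>
        if PySem.Set.contains pvOpenChordSet
            (pvTransposeRootDown ch.2.1 c ++ pvExtractQualitySuffix ch.2.2)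
          then score + 1 else score) 0
      = (ps.map (pvContrib c)).sum + (ps.map pvBase).sum := by
  suffices h : ∀ a : Int, ps.foldl
      (fun (score : Int) (ch : String × String × String) =>
        if PySem.Set.contains pvOpenChordSet
            (pvTransposeRootDown ch.2.1 c ++ pvExtractQualitySuffix ch.2.2)
          then score + 1 else score) a
      = a + (ps.map (pvContrib c)).sum + (ps.map pvBase).sum by
    simpa using h 0
  induction ps with
  | nil => intro a; simp
  | cons ch ps ih =>
    intro a
    simp only [List.foldl_cons, List.map_cons, List.sum_cons]
    rw [show (if PySem.Set.contains pvOpenChordSet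
          (pvTransposeRootDown ch.2.1 c ++ pvExtractQualitySuffix ch.2.2)
        then a + 1 else a)
      = a + (if PySem.Set.contains pvOpenChordSet
          (pvTransposeRootDown ch.2.1 c ++ pvExtractQualitySuffix ch.2.2)
        then (1 : Int) else 0) from by split_ifs <;> ring]
    rw [pvChord ch c hc0 hc1, ih]
    ring

-- lockstep: A's (best, score) fold and B's best fold agree when scores differ by a constant
theorem pvLockstep (s g : Int → Int) (base : Int) (l : List Int) :
    ∀ (b : Int), (∀ x ∈ l, s x = g x + base) → s b = g b + base →
    (l.foldl (fun (st : Int × Int) (c : Int) => if s c > st.2 then (c, s c) else st) (b, s b)).1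
      = l.foldl (fun (b : Int) (c : Int) => if g c > g b then c else b) b := by
  induction l with
  | nil => intro b _ _; rfl
  | cons c l ih =>
    intro b h hb
    have hc := h c List.mem_cons_self
    simp only [List.foldl_cons]
    by_cases hgt : g c > g b
    · rw [if_pos (show s c > s b by omega), if_pos hgt]
      exact ih c (fun x hx => h x (List.mem_cons_of_mem _ hx)) hc
    · rw [if_neg (show ¬ s c > s b by omega), if_neg hgt]
      exact ih b (fun x hx => h x (List.mem_cons_of_mem _ hx)) hb

-- proof-side names for A's per-capo score and B's counter lookups
def pvScoreA (ps : List (String × String × String)) (capo : Int) : Int :=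
  ps.foldl
    (fun (score : Int) (ch : String × String × String) =>
      if PySem.Set.contains pvOpenChordSet
          (pvTransposeRootDown ch.2.1 capo ++ pvExtractQualitySuffix ch.2.2)
        then score + 1 else score) 0

def pvCounts (ps : List (String × String × String)) : PySem.Dict Int Int :=
  ps.foldl
    (fun (d : PySem.Dict Int Int) (c : String × String × String) =>
      let suffix :=
        if 2 ≤ PySem.Str.len c.2.2 ∧
            (PySem.Str.pyGet? c.2.2 1 = some '#' ∨ PySem.Str.pyGet? c.2.2 1 = some 'b') then
          PySem.Str.slice c.2.2 (some 2) none
        else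
          PySem.Str.slice c.2.2 (some 1) none
      if c.2.1 ∈ pvNoteNames then
        let idx : Int := ((PySem.List.index? pvNoteNames c.2.1).getD 0 : Nat)
        (PySem.Dict.getD pvOpenBySuffix suffix []).foldl
          (fun (d2 : PySem.Dict Int Int) (o : Int) =>
            let capo := PySem.Int.mod (idx - o) 12
            if capo < 8 then d2.insert capo (d2.getD capo 0 + 1) else d2) d
      else d)
    PySem.Dict.empty

def pvG (ps : List (String × String × String)) (x : Int) : Int :=
  (pvCounts ps).getD x 0

theorem pvContrib_nonneg (c : Int) (ch : String × String × String) : 0 ≤ pvContrib c ch := by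
  unfold pvContrib
  split_ifs
  · positivity
  · exact le_refl 0

theorem pvBase_nonneg (ch : String × String × String) : 0 ≤ pvBase ch := by
  unfold pvBase
  split_ifs
  · exact zero_le_one
  · exact le_refl 0

theorem pvG_eq (ps : List (String × String × String)) (c : Int) :
    pvG ps c = (ps.map (pvContrib c)).sum := by
  unfold pvG pvCounts
  rw [pvCountsD]
  simp [PySem.Dict.getD, PySem.Dict.empty, PySem.Dict.get?]

theorem pvSG (ps : List (String × String × String)) (c : Int) (hc0 : 0 ≤ c) (hc1 : c < 8) :
    pvScoreA ps c = pvG ps c + (ps.map pvBase).sum := by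
  rw [pvG_eq]
  exact pvScore ps c hc0 hc1

-- ===== VERDICT (by name: the statement is the Claim_ definition above) =====
theorem choose_progression_capo_py_spec : Claim_equal_choose_progression_capo_py := by
  intro ps _
  unfold Spec_choose_progression_capo_py
  have hA : choose_progression_capo_py ps
      = ((PySem.List.pyRange 0 8 1).foldl
          (fun (st : Int × Int) (capo : Int) =>
            if pvScoreA ps capo > st.2 then (capo, pvScoreA ps capo) else st)
          (0, -1)).1 := rfl
  have hB : choose_progression_capo_py_alt ps
      = (PySem.List.pyRange 1 8 1).foldl
          (fun (b : Int) (c : Int) => if pvG ps c > pvG ps b then c else b) 0 := rfl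
  rw [hA, hB]
  rw [show PySem.List.pyRange 0 8 1 = [0, 1, 2, 3, 4, 5, 6, 7] from by decide,
    show PySem.List.pyRange 1 8 1 = [1, 2, 3, 4, 5, 6, 7] from by decide]
  have hbase : (0 : Int) ≤ (ps.map pvBase).sum :=
    List.sum_nonneg (by
      intro x hx
      obtain ⟨ch, -, rfl⟩ := List.mem_map.mp hx
      exact pvBase_nonneg ch)
  have hg0 : (0 : Int) ≤ pvG ps 0 := by
    rw [pvG_eq]
    exact List.sum_nonneg (by
      intro x hx
      obtain ⟨ch, -, rfl⟩ := List.mem_map.mp hx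
      exact pvContrib_nonneg 0 ch)
  have hs0 : pvScoreA ps 0 = pvG ps 0 + (ps.map pvBase).sum := pvSG ps 0 le_rfl (by norm_num)
  rw [List.foldl_cons]
  rw [if_pos (show pvScoreA ps 0 > ((0 : Int), (-1 : Int)).2 by
    have : (0 : Int) ≤ pvScoreA ps 0 := by rw [hs0]; omega
    simpa using lt_of_lt_of_le (by norm_num) this)]
  exact pvLockstep (pvScoreA ps) (pvG ps) ((ps.map pvBase).sum) [1, 2, 3, 4, 5, 6, 7] 0
    (by
      intro x hx
      fin_cases hx <;> exact pvSG ps _ (by norm_num) (by norm_num))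
    hs0
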